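-- pv_equiv track=rewrite | github.com/Xrt13/Realistic-Blackjack | blackjack.py | shuffel_deck
-- ===== SOURCE A (Python) =====
-- def shuffel_deck(card_deck, deck_ammount):
--     card_deck.clear()
--
--     card_types = ["a", "2", "3", "4", "5", "6", "7", "8", "9", "10", "j", "q", "k"]
--     card_shuffle_count = 0
--     suit_types = ["c", "d", "h", "s"]
--     suit_shuffle_count = 0
--     deck = 1
--
--     while deck <= deck_ammount:
--
--         next_card = suit_types[suit_shuffle_count] + card_types[card_shuffle_count]
--         card_shuffle_count += 1
--
--         if card_shuffle_count == 13:
--             card_shuffle_count = 0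
--             suit_shuffle_count += 1
--
--             if suit_shuffle_count == 4:
--                 suit_shuffle_count = 0
--                 deck += 1
--
--         card_deck.append(next_card)
--
--     return card_deck
-- ===== SOURCE B (Python) =====
-- def shuffel_deck(card_deck, deck_ammount):
--     card_deck.clear()
--
--     card_types = ["a", "2", "3", "4", "5", "6", "7", "8", "9", "10", "j", "q", "k"]
--     suit_types = ["c", "d", "h", "s"]
--     deck = 1
--
--     while deck <= deck_ammount:
--         for suit in suit_types:
--             for card in card_types:
--                 card_deck.append(suit + card)
--         deck += 1
--
--     return card_deck
-- ===== Notes on version B (the rewrite author's own statement) =====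
-- stated objective: simpler
-- what changed: Replaced the single flat while-loop with two hand-maintained modular counters (card index mod 13, suit index mod 4) by one while-loop per deck containing plain nested for-loops over suits and cards.
import Mathlib
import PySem

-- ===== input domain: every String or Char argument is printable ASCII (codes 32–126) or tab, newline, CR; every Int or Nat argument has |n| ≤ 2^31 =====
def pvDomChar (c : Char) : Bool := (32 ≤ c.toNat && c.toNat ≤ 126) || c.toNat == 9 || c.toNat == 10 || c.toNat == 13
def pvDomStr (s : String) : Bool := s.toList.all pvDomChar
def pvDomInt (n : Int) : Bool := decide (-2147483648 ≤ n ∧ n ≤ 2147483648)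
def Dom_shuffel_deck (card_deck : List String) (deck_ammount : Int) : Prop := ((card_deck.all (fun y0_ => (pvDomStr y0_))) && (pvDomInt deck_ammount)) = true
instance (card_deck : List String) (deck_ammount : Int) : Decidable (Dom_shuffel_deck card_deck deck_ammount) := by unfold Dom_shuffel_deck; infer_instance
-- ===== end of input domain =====

-- B replaces A's flat while-loop with two modular counters by nested for-loops per deck
-- (simpler); both programs clear and refill the passed list in place — the theorem is
-- about the returned value, and B performs the same mutation.

-- ===== PORT A =====
def pvCardTypes : List String := ["a", "2", "3", "4", "5", "6", "7", "8", "9", "10", "j", "q", "k"]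
def pvSuitTypes : List String := ["c", "d", "h", "s"]

-- A's while-loop; fuel is only a totality guard (the caller supplies enough fuel for
-- every iteration the Python loop performs, proved below).  List indexing uses getD:
-- the counters always stay in range (0..12 / 0..3), so it agrees with Python's [].
def pvLoopA : Nat → Nat → Nat → Int → Int → List String → List String
  | 0, _, _, _, _, acc => acc
  | fuel + 1, csc, ssc, deck, damt, acc =>
    if deck ≤ damt then
      let next := pvSuitTypes.getD ssc "" ++ pvCardTypes.getD csc ""
      let csc' := csc + 1
      if csc' = 13 then
        let ssc' := ssc + 1
        if ssc' = 4 then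
          pvLoopA fuel 0 0 (deck + 1) damt (acc ++ [next])
        else
          pvLoopA fuel 0 ssc' deck damt (acc ++ [next])
      else
        pvLoopA fuel csc' ssc deck damt (acc ++ [next])
    else acc

def shuffel_deck (card_deck : List String) (deck_ammount : Int) : List String :=
  pvLoopA (52 * deck_ammount.toNat) 0 0 1 deck_ammount []

-- ===== PORT B =====
-- one pass of B's nested for-loops, appending into the accumulated deck
def pvBlock (acc : List String) : List String :=
  pvSuitTypes.foldl (fun a suit => pvCardTypes.foldl (fun a card => a ++ [suit ++ card]) a) acc

def pvLoopB (deck damt : Int) (acc : List String) : List String :=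
  if deck ≤ damt then pvLoopB (deck + 1) damt (pvBlock acc) else acc
termination_by (damt + 1 - deck).toNat
decreasing_by omega

def shuffel_deck_alt (card_deck : List String) (deck_ammount : Int) : List String :=
  pvLoopB 1 deck_ammount []

-- ===== PRECONDITION & SPEC =====
def Spec_shuffel_deck (card_deck : List String) (deck_ammount : Int) (out : List String) : Prop := out = shuffel_deck_alt card_deck deck_ammount
instance (card_deck : List String) (deck_ammount : Int) (out : List String) : Decidable (Spec_shuffel_deck card_deck deck_ammount out) := by unfold Spec_shuffel_deck; infer_instance

-- ===== CLAIM (what is proved, stated in full; the proofs are below) =====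
def Claim_equal_shuffel_deck : Prop := ∀ (card_deck : List String) (deck_ammount : Int), Dom_shuffel_deck card_deck deck_ammount → Spec_shuffel_deck card_deck deck_ammount (shuffel_deck card_deck deck_ammount)

-- ===== LEMMAS AND PROOFS =====

-- B's nested folds append one full 52-card deck
lemma pvBlock_eq (acc : List String) : pvBlock acc = acc ++ pvBlock [] := by
  simp [pvBlock, pvSuitTypes, pvCardTypes, List.foldl]

-- 52 iterations of A's loop (one full cycle of both counters) append one full deck
lemma pvLoopA_cycle (fuel : Nat) (deck damt : Int) (acc : List String) (h : deck ≤ damt) :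
    pvLoopA (fuel + 52) 0 0 deck damt acc = pvLoopA fuel 0 0 (deck + 1) damt (acc ++ pvBlock []) := by
  simp [pvLoopA, h, pvBlock, pvSuitTypes, pvCardTypes, List.foldl]

lemma pvLoopA_eq_B (damt : Int) : ∀ (n : Nat) (deck : Int) (acc : List String) (fuel : Nat),
    (damt + 1 - deck).toNat ≤ n → 52 * n ≤ fuel →
    pvLoopA fuel 0 0 deck damt acc = pvLoopB deck damt acc := by
  intro n
  induction n with
  | zero =>
    intro deck acc fuel hn _
    have hd : ¬ deck ≤ damt := by omega
    rw [pvLoopB, if_neg hd]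
    cases fuel with
    | zero => rfl
    | succ f => simp [pvLoopA, hd]
  | succ n ih =>
    intro deck acc fuel hn hf
    by_cases hd : deck ≤ damt
    · obtain ⟨f, rfl⟩ : ∃ f, fuel = f + 52 := ⟨fuel - 52, by omega⟩
      rw [pvLoopA_cycle f deck damt acc hd, pvLoopB, if_pos hd, pvBlock_eq acc]
      exact ih (deck + 1) (acc ++ pvBlock []) f (by omega) (by omega)
    · rw [pvLoopB, if_neg hd]
      cases fuel with
      | zero => rfl
      | succ g => simp [pvLoopA, hd]

-- ===== VERDICT (by name: the statement is the Claim_ definition above) =====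
theorem shuffel_deck_spec : Claim_equal_shuffel_deck := by
  intro card_deck damt _
  unfold Spec_shuffel_deck shuffel_deck shuffel_deck_alt
  exact pvLoopA_eq_B damt damt.toNat 1 [] (52 * damt.toNat) (by omega) (by omega)
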